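-- pv_equiv track=rewrite | github.com/dbamman/lrec2020-coref | scripts/bert_coref.py | get_ant_labels
-- ===== SOURCE A (Python) =====
-- def get_ant_labels(all_doc_sents, all_doc_ents):
--
-- 	max_words=0
-- 	max_ents=0
-- 	mention_id=0
--
-- 	big_ents={}
--
-- 	doc_antecedent_labels=[]
-- 	big_doc_ents=[]
--
-- 	for idx, sent in enumerate(all_doc_sents):
-- 		if len(sent) > max_words:
-- 			max_words=len(sent)
--
-- 		this_sent_ents=[]
-- 		all_sent_ents=sorted(all_doc_ents[idx], key=lambda x: (x[0], x[1]))
-- 		if len(all_sent_ents) > max_ents: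
-- 			max_ents=len(all_sent_ents)
--
-- 		for (w_idx_start, w_idx_end, eid) in all_sent_ents:
--
-- 			this_sent_ents.append((w_idx_start, w_idx_end))
--
-- 			coref={}
-- 			if eid in big_ents:
-- 				coref=big_ents[eid]
-- 			else:
-- 				coref={mention_id:1}
--
-- 			vals=sorted(coref.keys())
--
-- 			if eid not in big_ents:
-- 				big_ents[eid]={}
--
-- 			big_ents[eid][mention_id]=1
-- 			mention_id+=1
--
-- 			doc_antecedent_labels.append(vals)
--
-- 		big_doc_ents.append(this_sent_ents)
--
--
-- 	return doc_antecedent_labels, big_doc_ents, max_words, max_ents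
-- ===== SOURCE B (Python) =====
-- def get_ant_labels(all_doc_sents, all_doc_ents):
--     max_words = 0
--     max_ents = 0
--     mention_id = 0
--     ent_mentions = {}
--     big_doc_ents = []
--
--     # pass 1: sizes, per-sentence spans, and per-entity mention-id groups
--     for sent, ents in zip(all_doc_sents, all_doc_ents):
--         if len(sent) > max_words:
--             max_words = len(sent)
--         sent_ents = sorted(ents, key=lambda x: (x[0], x[1]))
--         if len(sent_ents) > max_ents:
--             max_ents = len(sent_ents)
--         big_doc_ents.append([(s, e) for (s, e, _) in sent_ents])
--         for (_, _, eid) in sent_ents: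
--             ent_mentions.setdefault(eid, []).append(mention_id)
--             mention_id += 1
--
--     # pass 2: scatter each entity's prefix slices into place
--     doc_antecedent_labels = [None] * mention_id
--     for ids in ent_mentions.values():
--         doc_antecedent_labels[ids[0]] = [ids[0]]
--         for j in range(1, len(ids)):
--             doc_antecedent_labels[ids[j]] = ids[:j]
--
--     return doc_antecedent_labels, big_doc_ents, max_words, max_ents
-- ===== Notes on version B (the rewrite author's own statement) =====
-- stated objective: alternative
-- what changed: A interleaves everything in one nested loop, keeping a dict of per-entity mention-id dicts and emitting sorted(coref.keys()) inline at every mention; B first builds per-entity mention-id lists (a grouping pass over zip(sents, ents)) and then scatters each entity's prefix slices ids[:j] (and [ids[0]] for the first mention) into a preallocated result list.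
import Mathlib
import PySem

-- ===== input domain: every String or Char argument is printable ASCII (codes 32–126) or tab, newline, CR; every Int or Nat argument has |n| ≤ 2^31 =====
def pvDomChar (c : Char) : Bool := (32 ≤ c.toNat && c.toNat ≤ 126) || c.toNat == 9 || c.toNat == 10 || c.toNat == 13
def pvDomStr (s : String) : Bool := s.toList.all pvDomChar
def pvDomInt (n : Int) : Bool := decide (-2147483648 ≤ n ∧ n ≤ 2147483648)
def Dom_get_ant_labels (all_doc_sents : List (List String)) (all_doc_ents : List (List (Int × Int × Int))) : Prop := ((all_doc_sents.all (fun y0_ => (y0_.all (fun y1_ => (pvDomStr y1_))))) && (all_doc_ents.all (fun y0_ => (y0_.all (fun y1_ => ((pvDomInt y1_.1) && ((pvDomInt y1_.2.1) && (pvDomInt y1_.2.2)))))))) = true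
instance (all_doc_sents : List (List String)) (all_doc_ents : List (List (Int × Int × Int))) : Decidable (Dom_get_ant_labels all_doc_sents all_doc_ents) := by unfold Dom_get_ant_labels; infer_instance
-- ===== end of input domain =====

-- B replaces A's inline prefix accumulation (dict of per-entity mention-id dicts, key-sorted at
-- every mention) by a grouping pass (per-entity mention-id lists) followed by a scatter pass that
-- writes each prefix slice into a preallocated result; objective: alternative (similar cost).

-- ===== PORT A =====

-- inner loop over one sentence's sorted entity triples (state: mention_id, big_ents, labels, this_sent_ents)
def pvAInner (mid : Int) (big : PySem.Dict Int (PySem.Dict Int Int))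
    (labels : List (List Int)) (tse : List (Int × Int)) :
    List (Int × Int × Int) → Int × PySem.Dict Int (PySem.Dict Int Int) × List (List Int) × List (Int × Int)
  | [] => (mid, big, labels, tse)
  | (ws, we, eid) :: rest =>
    let tse' := tse ++ [(ws, we)]
    let coref : PySem.Dict Int Int :=
      if big.contains eid then big.getD eid PySem.Dict.empty
      else (PySem.Dict.empty.insert mid 1)
    let vals := PySem.List.sorted coref.keys (fun x => x) false
    let big' := if big.contains eid then big else big.insert eid PySem.Dict.empty
    let big'' := big'.modify eid PySem.Dict.empty (fun d => d.insert mid 1)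
    pvAInner (mid + 1) big'' (labels ++ [vals]) tse' rest

-- outer loop over enumerate(all_doc_sents); all_doc_ents[idx] is in range under Pre_
def pvAOuter (ents_all : List (List (Int × Int × Int))) (idx maxw maxe mid : Int)
    (big : PySem.Dict Int (PySem.Dict Int Int))
    (labels : List (List Int)) (bde : List (List (Int × Int))) :
    List (List String) → List (List Int) × List (List (Int × Int)) × Int × Int
  | [] => (labels, bde, maxw, maxe)
  | sent :: rest =>
    let maxw' := if (sent.length : Int) > maxw then (sent.length : Int) else maxw
    let se := PySem.List.sorted2 (PySem.List.pyGetD ents_all idx []) (fun x => x.1) (fun x => x.2.1)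
    let maxe' := if (se.length : Int) > maxe then (se.length : Int) else maxe
    let r := pvAInner mid big labels [] se
    pvAOuter ents_all (idx + 1) maxw' maxe' r.1 r.2.1 r.2.2.1 (bde ++ [r.2.2.2]) rest

def get_ant_labels (all_doc_sents : List (List String)) (all_doc_ents : List (List (Int × Int × Int))) : List (List Int) × (List (List (Int × Int))) × Int × Int :=
  pvAOuter all_doc_ents 0 0 0 0 PySem.Dict.empty [] [] all_doc_sents

-- ===== PORT B =====

-- pass-1 inner loop: ent_mentions.setdefault(eid, []).append(mention_id)
def pvBInner (mid : Int) (em : PySem.Dict Int (List Int)) :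
    List (Int × Int × Int) → Int × PySem.Dict Int (List Int)
  | [] => (mid, em)
  | (_, _, eid) :: rest => pvBInner (mid + 1) (em.modify eid [] (fun l => l ++ [mid])) rest

-- pass-1 outer loop over zip(all_doc_sents, all_doc_ents)
def pvBOuter (maxw maxe mid : Int) (em : PySem.Dict Int (List Int))
    (bde : List (List (Int × Int))) :
    List (List String × List (Int × Int × Int)) →
      Int × Int × Int × PySem.Dict Int (List Int) × List (List (Int × Int))
  | [] => (maxw, maxe, mid, em, bde)
  | (sent, ents) :: rest =>
    let maxw' := if (sent.length : Int) > maxw then (sent.length : Int) else maxw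
    let se := PySem.List.sorted2 ents (fun x => x.1) (fun x => x.2.1)
    let maxe' := if (se.length : Int) > maxe then (se.length : Int) else maxe
    let bde' := bde ++ [se.map (fun t => (t.1, t.2.1))]
    let r := pvBInner mid em se
    pvBOuter maxw' maxe' r.1 r.2 bde' rest

-- pass-2 scatter of one entity's mention-id list (ids is nonempty and its entries are valid
-- nonnegative indices by construction, so the total forms pyGetD/pySetD are exact there)
def pvScatterGroup (lab : List (List Int)) (ids : List Int) : List (List Int) :=
  let lab1 := PySem.List.pySetD lab (PySem.List.pyGetD ids 0 0) [PySem.List.pyGetD ids 0 0]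
  (PySem.List.pyRange 1 (ids.length : Int) 1).foldl
    (fun l j => PySem.List.pySetD l (PySem.List.pyGetD ids j 0) (PySem.List.slice ids none (some j))) lab1

def get_ant_labels_alt (all_doc_sents : List (List String)) (all_doc_ents : List (List (Int × Int × Int))) : List (List Int) × (List (List (Int × Int))) × Int × Int :=
  let r := pvBOuter 0 0 0 PySem.Dict.empty [] (all_doc_sents.zip all_doc_ents)
  -- [None] * mention_id: placeholder [] stands for None; every slot is assigned in pass 2
  let lab0 : List (List Int) := List.replicate r.2.2.1.toNat []
  let labels := r.2.2.2.1.values.foldl pvScatterGroup lab0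
  (labels, r.2.2.2.2, r.1, r.2.1)

-- ===== PRECONDITION & SPEC =====
-- Pre_ excludes exactly the inputs where A raises IndexError: fewer entity lists than sentences.
def Pre_get_ant_labels (all_doc_sents : List (List String)) (all_doc_ents : List (List (Int × Int × Int))) : Prop :=
  all_doc_sents.length ≤ all_doc_ents.length
instance (all_doc_sents : List (List String)) (all_doc_ents : List (List (Int × Int × Int))) : Decidable (Pre_get_ant_labels all_doc_sents all_doc_ents) := by unfold Pre_get_ant_labels; infer_instance
def pvWitness_get_ant_labels : List (List String) × (List (List (Int × Int × Int))) :=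
  ([["a", "b"], ["c"]], [[(0, 1, 7), (0, 0, 7)], [(0, 0, 3)]])


def Spec_get_ant_labels (all_doc_sents : List (List String)) (all_doc_ents : List (List (Int × Int × Int))) (out : List (List Int) × (List (List (Int × Int))) × Int × Int) : Prop := out = get_ant_labels_alt all_doc_sents all_doc_ents
instance (all_doc_sents : List (List String)) (all_doc_ents : List (List (Int × Int × Int))) (out : List (List Int) × (List (List (Int × Int))) × Int × Int) : Decidable (Spec_get_ant_labels all_doc_sents all_doc_ents out) := by unfold Spec_get_ant_labels; infer_instance

-- ===== CLAIM (what is proved, stated in full; the proofs are below) =====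
def Claim_equal_get_ant_labels : Prop := ∀ (all_doc_sents : List (List String)) (all_doc_ents : List (List (Int × Int × Int))), Dom_get_ant_labels all_doc_sents all_doc_ents → Pre_get_ant_labels all_doc_sents all_doc_ents → Spec_get_ant_labels all_doc_sents all_doc_ents (get_ant_labels all_doc_sents all_doc_ents)

-- ===== LEMMAS AND PROOFS =====

def pvGroupOf (ps : List (Int × Int)) (e : Int) : List Int :=
  (ps.filter (fun p => p.2 == e)).map (·.1)

def pvPairsFrom (i : Int) : List Int → List (Int × Int)
  | [] => []
  | e :: rest => (i, e) :: pvPairsFrom (i + 1) rest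

def pvSpecAux (done : List (Int × Int)) : List (Int × Int) → List (List Int)
  | [] => []
  | (i, e) :: rest =>
      (if pvGroupOf done e = [] then [i] else pvGroupOf done e) :: pvSpecAux (done ++ [(i, e)]) rest

theorem pvPairsFrom_append (i : Int) (xs ys : List Int) :
    pvPairsFrom i (xs ++ ys) = pvPairsFrom i xs ++ pvPairsFrom (i + xs.length) ys := by
  induction xs generalizing i with
  | nil => simp [pvPairsFrom]
  | cons x xs ih => simp [pvPairsFrom, ih (i+1)]; ring_nf

theorem pvGroupOf_append (ps qs : List (Int × Int)) (e : Int) :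
    pvGroupOf (ps ++ qs) e = pvGroupOf ps e ++ pvGroupOf qs e := by
  simp [pvGroupOf]

theorem pvMem_groupOf (ps : List (Int × Int)) (e x : Int) :
    x ∈ pvGroupOf ps e ↔ (x, e) ∈ ps := by
  simp only [pvGroupOf, List.mem_map, List.mem_filter]
  constructor
  · rintro ⟨⟨a, b⟩, ⟨hp, h2⟩, h1⟩
    simp at h1 h2; subst h1; subst h2; exact hp
  · intro hp; exact ⟨(x, e), ⟨hp, by simp⟩, rfl⟩

theorem pvMem_pairsFrom (i x e : Int) (es : List Int) :
    (x, e) ∈ pvPairsFrom i es ↔ ∃ j : Nat, ∃ hj : j < es.length, x = i + j ∧ e = es[j] := by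
  induction es generalizing i with
  | nil => simp [pvPairsFrom]
  | cons a es ih =>
    simp only [pvPairsFrom, List.mem_cons, ih (i+1), Prod.mk.injEq]
    constructor
    · rintro (⟨rfl, rfl⟩ | ⟨j, hj, rfl, rfl⟩)
      · exact ⟨0, by simp, by simp, by simp⟩
      · exact ⟨j+1, by simpa using hj, by push_cast; ring, by simp⟩
    · rintro ⟨j, hj, rfl, rfl⟩
      cases j with
      | zero => left; simp
      | succ j => right; exact ⟨j, by simpa using hj, by push_cast; ring, by simp⟩

theorem pvGroupOf_bounds (i : Int) (es : List Int) (e : Int) :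
    ∀ x ∈ pvGroupOf (pvPairsFrom i es) e, i ≤ x ∧ x < i + es.length := by
  intro x hx
  rw [pvMem_groupOf, pvMem_pairsFrom] at hx
  obtain ⟨j, hj, rfl, _⟩ := hx
  omega

theorem pvGroupOf_pairwise (i : Int) (es : List Int) (e : Int) :
    (pvGroupOf (pvPairsFrom i es) e).Pairwise (· < ·) := by
  induction es generalizing i with
  | nil => simp [pvPairsFrom, pvGroupOf]
  | cons a es ih =>
    simp only [pvPairsFrom, pvGroupOf, List.filter_cons]
    by_cases h : ((i, a).2 == e)
    · simp only [h, if_true, List.map_cons, List.pairwise_cons]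
      refine ⟨?_, ih (i+1)⟩
      intro x hx
      have := pvGroupOf_bounds (i+1) es e x (by simpa [pvGroupOf] using hx)
      omega
    · simp only [Bool.not_eq_true] at h
      simp only [h]
      exact ih (i+1)

theorem pvGroupOf_ne_nil_iff (i : Int) (es : List Int) (e : Int) :
    pvGroupOf (pvPairsFrom i es) e ≠ [] ↔ e ∈ es := by
  constructor
  · intro h
    obtain ⟨x, hx⟩ := List.exists_mem_of_ne_nil _ h
    rw [pvMem_groupOf, pvMem_pairsFrom] at hx
    obtain ⟨j, hj, _, rfl⟩ := hx
    exact List.getElem_mem hj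
  · intro he
    obtain ⟨j, hj, rfl⟩ := List.mem_iff_getElem.1 he
    refine List.ne_nil_of_mem (a := i + j) ?_
    rw [pvMem_groupOf, pvMem_pairsFrom]
    exact ⟨j, hj, rfl, rfl⟩

theorem pvSpecAux_append (done ps qs : List (Int × Int)) :
    pvSpecAux done (ps ++ qs) = pvSpecAux done ps ++ pvSpecAux (done ++ ps) qs := by
  induction ps generalizing done with
  | nil => simp [pvSpecAux]
  | cons p ps ih => obtain ⟨a, b⟩ := p; simp [pvSpecAux, ih]

theorem pvSpecAux_length (done ps : List (Int × Int)) :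
    (pvSpecAux done ps).length = ps.length := by
  induction ps generalizing done with
  | nil => simp [pvSpecAux]
  | cons p ps ih => obtain ⟨a, b⟩ := p; simp [pvSpecAux, ih]

theorem pvPairsFrom_length (i : Int) (es : List Int) :
    (pvPairsFrom i es).length = es.length := by
  induction es generalizing i with
  | nil => simp [pvPairsFrom]
  | cons a es ih => simp [pvPairsFrom, ih]

def pvInvA (es : List Int) (big : PySem.Dict Int (PySem.Dict Int Int)) : Prop :=
  (∀ e, (big.getD e PySem.Dict.empty).keys = pvGroupOf (pvPairsFrom 0 es) e) ∧
  (∀ e, big.contains e = decide (e ∈ es))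

-- one step of A's inner loop preserves the invariant and emits the spec label

theorem pvInvA_step (es : List Int) (big : PySem.Dict Int (PySem.Dict Int Int)) (eid : Int)
    (h : pvInvA es big) :
    pvInvA (es ++ [eid])
      ((if big.contains eid then big else big.insert eid PySem.Dict.empty).modify eid
        PySem.Dict.empty (fun d => d.insert (es.length : Int) 1)) := by
  obtain ⟨h1, h2⟩ := h
  set big' := if big.contains eid then big else big.insert eid PySem.Dict.empty with hbig'
  have hgetD' : ∀ e, (big'.getD e PySem.Dict.empty).keys = pvGroupOf (pvPairsFrom 0 es) e := by
    intro e
    rw [hbig']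
    by_cases hc : big.contains eid
    · simp [hc, h1 e]
    · simp only [hc, Bool.false_eq_true, if_false]
      by_cases he : e = eid
      · subst he
        rw [PySem.Dict.getD_insert_self]
        have : ¬ e ∈ es := by simp only [h2 e] at hc; simpa using hc
        have hnil : pvGroupOf (pvPairsFrom 0 es) e = [] := by
          by_contra hne; exact this ((pvGroupOf_ne_nil_iff 0 es e).1 hne)
        simp [hnil, PySem.Dict.keys_empty]
      · rw [PySem.Dict.getD_insert_of_ne _ _ _ he, h1 e]
  constructor
  · intro e
    by_cases he : e = eid
    · subst he
      rw [PySem.Dict.getD_modify_self]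
      have hkeys := hgetD' e
      have hnotin : ((big'.getD e PySem.Dict.empty).contains ((es.length : Int))) = false := by
        rw [Bool.eq_false_iff]
        intro hcon
        have hm := (PySem.Dict.contains_iff_mem_keys _ _).1 hcon
        rw [hkeys] at hm
        have := pvGroupOf_bounds 0 es e _ hm
        omega
      rw [PySem.Dict.keys_insert_of_not_contains _ _ hnotin, hkeys,
          pvPairsFrom_append, pvGroupOf_append]
      simp [pvPairsFrom, pvGroupOf]
    · rw [PySem.Dict.getD_modify_of_ne _ _ _ he, hgetD' e,
          pvPairsFrom_append, pvGroupOf_append]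
      simp [pvPairsFrom, pvGroupOf, Ne.symm he]
  · intro e
    rw [PySem.Dict.contains_modify]
    have hc' : big'.contains e = decide (e ∈ es) ∨ (e = eid ∧ big'.contains e = true) := by
      rw [hbig']
      by_cases hc : big.contains eid
      · left; simp [hc, h2 e]
      · by_cases he : e = eid
        · right; subst he; simp [hc]
        · left
          simp only [hc, Bool.false_eq_true, if_false]
          rw [PySem.Dict.contains_insert]
          simp [he, h2 e]
    by_cases he : e = eid
    · subst he; simp
    · rcases hc' with hc' | ⟨rfl, _⟩
      · rw [show (e == eid) = false by simpa using he, hc']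
        simp [he]
      · simp at he

theorem pvAInner_spec (ts : List (Int × Int × Int)) :
    ∀ (es : List Int) (big : PySem.Dict Int (PySem.Dict Int Int))
      (labels : List (List Int)) (tse : List (Int × Int)), pvInvA es big →
    ∃ big', pvAInner (es.length : Int) big labels tse ts =
        ((es.length : Int) + ts.length, big',
          labels ++ pvSpecAux (pvPairsFrom 0 es) (pvPairsFrom (es.length : Int) (ts.map (·.2.2))),
          tse ++ ts.map (fun t => (t.1, t.2.1))) ∧
      pvInvA (es ++ ts.map (·.2.2)) big' := by
  induction ts with
  | nil =>
    intro es big labels tse h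
    exact ⟨big, by simp [pvAInner, pvSpecAux, pvPairsFrom], by simpa using h⟩
  | cons t rest ih =>
    intro es big labels tse h
    obtain ⟨ws, we, eid⟩ := t
    obtain ⟨h1, h2⟩ := h
    -- the emitted label
    have hvals :
        PySem.List.sorted
          (if big.contains eid then big.getD eid PySem.Dict.empty
           else (PySem.Dict.empty.insert (es.length : Int) 1)).keys (fun x => x) false =
        (if pvGroupOf (pvPairsFrom 0 es) eid = [] then [(es.length : Int)]
         else pvGroupOf (pvPairsFrom 0 es) eid) := by
      by_cases hc : eid ∈ es
      · have hct : big.contains eid = true := by rw [h2 eid]; simpa using hc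
        have hne : pvGroupOf (pvPairsFrom 0 es) eid ≠ [] := (pvGroupOf_ne_nil_iff 0 es eid).2 hc
        rw [if_pos hct, if_neg hne, h1 eid]
        exact PySem.List.sorted_eq_self_of_pairwise _ _
          ((pvGroupOf_pairwise 0 es eid).imp (fun h => le_of_lt h))
      · have hct : big.contains eid = false := by rw [h2 eid]; simpa using hc
        have hnil : pvGroupOf (pvPairsFrom 0 es) eid = [] := by
          by_contra hne; exact hc ((pvGroupOf_ne_nil_iff 0 es eid).1 hne)
        rw [hct, if_neg (by simp), if_pos hnil]
        rw [PySem.Dict.keys_insert_of_not_contains _ _ (by simp [PySem.Dict.contains_empty])]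
        simp [PySem.Dict.keys_empty]
        exact PySem.List.sorted_eq_self_of_pairwise _ _ (by simp)
    have hstep := pvInvA_step es big eid ⟨h1, h2⟩
    have hlen : ((es ++ [eid]).length : Int) = (es.length : Int) + 1 := by simp
    obtain ⟨big', heq, hinv⟩ :=
      ih (es ++ [eid])
        ((if big.contains eid then big else big.insert eid PySem.Dict.empty).modify eid
          PySem.Dict.empty (fun d => d.insert (es.length : Int) 1))
        (labels ++ [(if pvGroupOf (pvPairsFrom 0 es) eid = [] then [(es.length : Int)]
         else pvGroupOf (pvPairsFrom 0 es) eid)])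
        (tse ++ [(ws, we)]) hstep
    rw [hlen] at heq
    refine ⟨big', ?_, by simpa using hinv⟩
    show pvAInner ((es.length : Int)) big labels tse ((ws, we, eid) :: rest) = _
    rw [pvAInner]
    simp only [hvals]
    rw [heq]
    have hpairs : pvPairsFrom 0 (es ++ [eid]) =
        pvPairsFrom 0 es ++ [((es.length : Int), eid)] := by
      rw [pvPairsFrom_append]; simp [pvPairsFrom]
    refine Prod.ext_iff.2 ⟨by simp; omega, Prod.ext_iff.2 ⟨rfl, Prod.ext_iff.2 ⟨?_, by simp⟩⟩⟩
    show labels ++ _ ++ _ = labels ++ pvSpecAux (pvPairsFrom 0 es)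
        (pvPairsFrom (es.length : Int) (List.map (fun x => x.2.2) ((ws, we, eid) :: rest)))
    rw [List.map_cons,
        show pvPairsFrom (es.length : Int) (eid :: rest.map (·.2.2)) =
          ((es.length : Int), eid) :: pvPairsFrom ((es.length : Int) + 1) (rest.map (·.2.2)) from rfl,
        pvSpecAux, ← hpairs]
    simp

def pvSE (ents : List (Int × Int × Int)) : List (Int × Int × Int) :=
  PySem.List.sorted2 ents (fun x => x.1) (fun x => x.2.1)

def pvFlatE (z : List (List String × List (Int × Int × Int))) : List Int :=
  z.flatMap (fun p => (pvSE p.2).map (·.2.2))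

def pvBdeOf (z : List (List String × List (Int × Int × Int))) : List (List (Int × Int)) :=
  z.map (fun p => (pvSE p.2).map (fun t => (t.1, t.2.1)))

def pvMwOf (m : Int) (z : List (List String × List (Int × Int × Int))) : Int :=
  z.foldl (fun m p => if (p.1.length : Int) > m then (p.1.length : Int) else m) m

def pvMeOf (m : Int) (z : List (List String × List (Int × Int × Int))) : Int :=
  z.foldl (fun m p => if ((pvSE p.2).length : Int) > m then ((pvSE p.2).length : Int) else m) m

theorem pvFlatE_cons (p : List String × List (Int × Int × Int))
    (z : List (List String × List (Int × Int × Int))) :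
    pvFlatE (p :: z) = (pvSE p.2).map (·.2.2) ++ pvFlatE z := rfl

theorem pvBdeOf_cons (p : List String × List (Int × Int × Int))
    (z : List (List String × List (Int × Int × Int))) :
    pvBdeOf (p :: z) = (pvSE p.2).map (fun t => (t.1, t.2.1)) :: pvBdeOf z := rfl

theorem pvMwOf_cons (m : Int) (p : List String × List (Int × Int × Int))
    (z : List (List String × List (Int × Int × Int))) :
    pvMwOf m (p :: z) = pvMwOf (if (p.1.length : Int) > m then (p.1.length : Int) else m) z := rfl

theorem pvMeOf_cons (m : Int) (p : List String × List (Int × Int × Int))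
    (z : List (List String × List (Int × Int × Int))) :
    pvMeOf m (p :: z) =
      pvMeOf (if ((pvSE p.2).length : Int) > m then ((pvSE p.2).length : Int) else m) z := rfl

theorem pvSpec_chunk (es m : List Int) (F : List Int) :
    pvSpecAux (pvPairsFrom 0 es) (pvPairsFrom (es.length : Int) (m ++ F)) =
      pvSpecAux (pvPairsFrom 0 es) (pvPairsFrom (es.length : Int) m) ++
        pvSpecAux (pvPairsFrom 0 (es ++ m)) (pvPairsFrom ((es.length : Int) + m.length) F) := by
  rw [pvPairsFrom_append, pvSpecAux_append]
  congr 2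
  rw [pvPairsFrom_append]
  simp

theorem pvAOuter_spec (sents : List (List String)) :
    ∀ (ents : List (List (Int × Int × Int))) (idx : Nat),
      idx + sents.length ≤ ents.length →
    ∀ (maxw maxe : Int) (es : List Int) big labels bde, pvInvA es big →
    pvAOuter ents (idx : Int) maxw maxe (es.length : Int) big labels bde sents =
      (labels ++ pvSpecAux (pvPairsFrom 0 es)
          (pvPairsFrom (es.length : Int) (pvFlatE (sents.zip (ents.drop idx)))),
        bde ++ pvBdeOf (sents.zip (ents.drop idx)),
        pvMwOf maxw (sents.zip (ents.drop idx)),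
        pvMeOf maxe (sents.zip (ents.drop idx))) := by
  induction sents with
  | nil =>
    intro ents idx h maxw maxe es big labels bde hinv
    simp [pvAOuter, pvFlatE, pvBdeOf, pvMwOf, pvMeOf, pvSpecAux, pvPairsFrom]
  | cons sent rest ih =>
    intro ents idx h maxw maxe es big labels bde hinv
    have hidx : idx < ents.length := by simp at h; omega
    have hget : PySem.List.pyGetD ents (idx : Int) [] = ents[idx] :=
      PySem.List.pyGetD_eq_getElem ents [] (by positivity) (by exact_mod_cast hidx)
    have hdrop : ents.drop idx = ents[idx] :: ents.drop (idx + 1) :=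
      List.drop_eq_getElem_cons hidx
    set se := pvSE ents[idx] with hse
    obtain ⟨big', heq, hinv'⟩ := pvAInner_spec se es big labels [] hinv
    rw [pvAOuter]
    rw [hget]
    rw [show PySem.List.sorted2 ents[idx] (fun x => x.1) (fun x => x.2.1) = se by rw [hse, pvSE]]
    rw [heq]
    dsimp only
    simp only [List.nil_append]
    have hlen : ((es ++ se.map (·.2.2)).length : Int) = (es.length : Int) + (se.length : Int) := by simp
    have := ih ents (idx + 1) (by simp at h ⊢; omega) 
        (if (sent.length : Int) > maxw then (sent.length : Int) else maxw)
        (if (se.length : Int) > maxe then (se.length : Int) else maxe)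
        (es ++ se.map (·.2.2)) big'
        (labels ++ pvSpecAux (pvPairsFrom 0 es)
          (pvPairsFrom (es.length : Int) (se.map (·.2.2))))
        (bde ++ [se.map (fun t => (t.1, t.2.1))]) hinv'
    rw [hlen] at this
    rw [show ((idx : Int) + 1) = ((idx + 1 : Nat) : Int) by push_cast; ring]
    rw [this]
    rw [hdrop]
    simp only [List.zip_cons_cons]
    refine Prod.ext_iff.2 ⟨?_, Prod.ext_iff.2 ⟨?_, Prod.ext_iff.2 ⟨?_, ?_⟩⟩⟩
    · dsimp only
      rw [pvFlatE_cons]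
      rw [show (pvSE (sent, ents[idx]).2).map (·.2.2) = se.map (fun x => x.2.2) by simp [hse]]
      rw [pvSpec_chunk, List.append_assoc]
      congr 3
      simp
    · dsimp only
      rw [pvBdeOf_cons]
      simp [hse, List.append_assoc]
    · dsimp only
      rw [pvMwOf_cons]
    · dsimp only
      rw [pvMeOf_cons]

def pvInvB (es : List Int) (em : PySem.Dict Int (List Int)) : Prop :=
  (∀ e, em.getD e [] = pvGroupOf (pvPairsFrom 0 es) e) ∧
  em.keys = PySem.Set.ofList es

theorem pvInvB_step (es : List Int) (em : PySem.Dict Int (List Int)) (eid : Int)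
    (h : pvInvB es em) :
    pvInvB (es ++ [eid]) (em.modify eid [] (fun l => l ++ [(es.length : Int)])) := by
  obtain ⟨h1, h2⟩ := h
  constructor
  · intro e
    by_cases he : e = eid
    · subst he
      rw [PySem.Dict.getD_modify_self, h1 e, pvPairsFrom_append, pvGroupOf_append]
      simp [pvPairsFrom, pvGroupOf]
    · rw [PySem.Dict.getD_modify_of_ne _ _ _ he, h1 e, pvPairsFrom_append, pvGroupOf_append]
      simp [pvPairsFrom, pvGroupOf, Ne.symm he]
  · rw [PySem.Dict.keys_modify, PySem.Set.ofList_append_singleton]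
    by_cases hc : em.contains eid
    · have hm : eid ∈ PySem.Set.ofList es := by
        rw [← h2]; exact (PySem.Dict.contains_iff_mem_keys _ _).1 hc
      rw [PySem.Dict.keys_insert_of_contains _ _ hc, h2, PySem.Set.add_of_mem hm]
    · have hm : eid ∉ PySem.Set.ofList es := by
        rw [← h2]; intro hmm
        have := (PySem.Dict.contains_iff_mem_keys _ _).2 hmm
        simp [this] at hc
      rw [PySem.Dict.keys_insert_of_not_contains _ _ (by simpa using hc), h2,
          PySem.Set.add_of_not_mem hm]

theorem pvBInner_spec (ts : List (Int × Int × Int)) :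
    ∀ (es : List Int) (em : PySem.Dict Int (List Int)), pvInvB es em →
    ∃ em', pvBInner (es.length : Int) em ts = ((es.length : Int) + ts.length, em') ∧
      pvInvB (es ++ ts.map (·.2.2)) em' := by
  induction ts with
  | nil => intro es em h; exact ⟨em, by simp [pvBInner], by simpa using h⟩
  | cons t rest ih =>
    intro es em h
    obtain ⟨ws, we, eid⟩ := t
    obtain ⟨em', heq, hinv⟩ := ih (es ++ [eid])
      (em.modify eid [] (fun l => l ++ [(es.length : Int)])) (pvInvB_step es em eid h)
    refine ⟨em', ?_, by simpa using hinv⟩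
    rw [pvBInner]
    rw [show ((es ++ [eid]).length : Int) = (es.length : Int) + 1 by simp] at heq
    rw [heq]
    refine Prod.ext_iff.2 ⟨by simp; omega, rfl⟩

theorem pvBOuter_spec (z : List (List String × List (Int × Int × Int))) :
    ∀ (maxw maxe : Int) (es : List Int) (em : PySem.Dict Int (List Int)) bde, pvInvB es em →
    ∃ em', pvBOuter maxw maxe (es.length : Int) em bde z =
        (pvMwOf maxw z, pvMeOf maxe z, (es.length : Int) + (pvFlatE z).length, em', bde ++ pvBdeOf z) ∧
      pvInvB (es ++ pvFlatE z) em' := by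
  induction z with
  | nil =>
    intro maxw maxe es em bde h
    exact ⟨em, by simp [pvBOuter, pvMwOf, pvMeOf, pvFlatE, pvBdeOf], by simpa [pvFlatE] using h⟩
  | cons p z ih =>
    intro maxw maxe es em bde h
    obtain ⟨sent, ents⟩ := p
    set se := pvSE ents with hse
    obtain ⟨em1, heq1, hinv1⟩ := pvBInner_spec se es em h
    obtain ⟨em', heq2, hinv2⟩ := ih
      (if (sent.length : Int) > maxw then (sent.length : Int) else maxw)
      (if (se.length : Int) > maxe then (se.length : Int) else maxe)
      (es ++ se.map (·.2.2)) em1 (bde ++ [se.map (fun t => (t.1, t.2.1))]) hinv1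
    refine ⟨em', ?_, ?_⟩
    · rw [pvBOuter]
      rw [show PySem.List.sorted2 ents (fun x => x.1) (fun x => x.2.1) = se by rw [hse, pvSE]]
      rw [heq1]
      rw [show ((es ++ se.map (·.2.2)).length : Int) = (es.length : Int) + (se.length : Int) by simp] at heq2
      rw [heq2]
      rw [pvMwOf_cons, pvMeOf_cons, pvBdeOf_cons, pvFlatE_cons]
      exact Prod.ext_iff.2 ⟨rfl, Prod.ext_iff.2 ⟨rfl, Prod.ext_iff.2 ⟨by simp [hse]; omega,
        Prod.ext_iff.2 ⟨rfl, by simp [hse, List.append_assoc]⟩⟩⟩⟩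
    · rw [pvFlatE_cons, ← List.append_assoc]
      simpa [hse] using hinv2

theorem pvRange_one_eq (n : Nat) :
    PySem.List.pyRange 1 (n : Int) 1 = (List.range' 1 (n - 1)).map (fun j : Nat => (j : Int)) := by
  induction n with
  | zero => decide
  | succ n ih =>
    cases n with
    | zero => decide
    | succ m =>
      rw [show ((m + 1 + 1 : Nat) : Int) = ((m + 1 : Nat) : Int) + 1 by push_cast; ring,
          PySem.List.pyRange_one_succ_right (by push_cast; omega), ih]
      rw [show (m + 1 + 1 - 1) = (m + 1 - 1) + 1 by omega, List.range'_concat]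
      simp
      omega

theorem pvGetD_nonneg (ids : List Int) (hnn : ∀ x ∈ ids, 0 ≤ x) (j : Nat) :
    0 ≤ ids.getD j 0 := by
  rcases Nat.lt_or_ge j ids.length with hj | hj
  · rw [List.getD_eq_getElem _ _ hj]; exact hnn _ (List.getElem_mem hj)
  · rw [List.getD_eq_default _ _ hj]

-- pvScatterGroup written with Nat indexing

theorem pvScatterGroup_eq (lab : List (List Int)) (ids : List Int)
    (hnn : ∀ x ∈ ids, 0 ≤ x) :
    pvScatterGroup lab ids =
      (List.range' 1 (ids.length - 1)).foldl
        (fun l j => l.set (ids.getD j 0).toNat (ids.take j))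
        (lab.set (ids.getD 0 0).toNat [ids.getD 0 0]) := by
  rw [pvScatterGroup, pvRange_one_eq, List.foldl_map]
  have h0 : PySem.List.pyGetD ids 0 0 = ids.getD 0 0 := PySem.List.pyGetD_zero ids 0
  rw [h0, PySem.List.pySetD_of_nonneg _ _ (pvGetD_nonneg ids hnn 0)]
  congr 1
  funext l j
  rw [PySem.List.pyGetD_natCast, PySem.List.slice_to_natCast,
      PySem.List.pySetD_of_nonneg _ _ (pvGetD_nonneg ids hnn j)]

theorem pvFoldSet_preserve (ids : List Int) (k : Nat)
    (hnn : ∀ x ∈ ids, 0 ≤ x)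
    (js : List Nat) (l : List (List Int))
    (h : ∀ j ∈ js, ids.getD j 0 ≠ (k : Int)) :
    ((js.foldl (fun l j => l.set (ids.getD j 0).toNat (ids.take j)) l))[k]? = l[k]? := by
  induction js generalizing l with
  | nil => rfl
  | cons j js ih =>
    rw [List.foldl_cons, ih _ (fun x hx => h x (List.mem_cons_of_mem _ hx))]
    have hne := h j (List.mem_cons_self)
    have hj0 := pvGetD_nonneg ids hnn j
    rw [List.getElem?_set_ne]
    omega

theorem pvFoldSet_length (ids : List Int) (js : List Nat) (l : List (List Int)) :
    ((js.foldl (fun l j => l.set (ids.getD j 0).toNat (ids.take j)) l)).length = l.length := by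
  induction js generalizing l with
  | nil => rfl
  | cons j js ih => rw [List.foldl_cons, ih]; exact List.length_set ..

theorem pvScatterGroup_length (lab : List (List Int)) (ids : List Int)
    (hnn : ∀ x ∈ ids, 0 ≤ x) :
    (pvScatterGroup lab ids).length = lab.length := by
  rw [pvScatterGroup_eq lab ids hnn, pvFoldSet_length, List.length_set]

theorem pvScatterGroup_miss (lab : List (List Int)) (ids : List Int)
    (hnn : ∀ x ∈ ids, 0 ≤ x) (hne : ids ≠ []) (k : Nat) (hk : (k : Int) ∉ ids) :
    (pvScatterGroup lab ids)[k]? = lab[k]? := by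
  rw [pvScatterGroup_eq lab ids hnn]
  rw [pvFoldSet_preserve ids k hnn _ _ ?_]
  · have hpos : 0 < ids.length := List.length_pos_of_ne_nil hne
    have hmem : ids.getD 0 0 ∈ ids := by
      rw [List.getD_eq_getElem _ _ hpos]; exact List.getElem_mem hpos
    have hne0 : ids.getD 0 0 ≠ (k : Int) := fun hcon => hk (hcon ▸ hmem)
    rw [List.getElem?_set_ne]
    have := pvGetD_nonneg ids hnn 0
    omega
  · intro j hj
    have hjlt : j < ids.length := by
      have := List.mem_range'_1.1 hj; omega
    have hmem : ids.getD j 0 ∈ ids := by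
      rw [List.getD_eq_getElem _ _ hjlt]; exact List.getElem_mem hjlt
    exact fun hcon => hk (hcon ▸ hmem)

theorem pvScatterGroup_hit (lab : List (List Int)) (ids : List Int)
    (hnn : ∀ x ∈ ids, 0 ≤ x) (hb : ∀ x ∈ ids, x < (lab.length : Int))
    (hinc : ids.Pairwise (· < ·)) (j : Nat) (hj : j < ids.length) (k : Nat)
    (hk : ids[j] = (k : Int)) :
    (pvScatterGroup lab ids)[k]? =
      some (if j = 0 then [ids.getD 0 0] else ids.take j) := by
  have hgetE := List.pairwise_iff_getElem.1 hinc
  have hlen0 : ∀ l : List (List Int),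
      ((List.range' 1 (ids.length - 1)).foldl
        (fun l j => l.set (ids.getD j 0).toNat (ids.take j)) l).length = l.length :=
    fun l => pvFoldSet_length ids _ l
  rw [pvScatterGroup_eq lab ids hnn]
  rcases Nat.eq_zero_or_pos j with rfl | hjpos
  · -- written by the initial set, preserved by the rest
    rw [pvFoldSet_preserve ids k hnn _ _ ?_]
    · have h0 : ids.getD 0 0 = ids[0] := List.getD_eq_getElem _ _ hj
      rw [if_pos rfl, h0, hk]
      have hklt : k < lab.length := by
        have := hb _ (hk ▸ List.getElem_mem hj); omega
      simp [hklt]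
    · intro j' hj'
      have hj'r := List.mem_range'_1.1 hj'
      have hj'lt : j' < ids.length := by omega
      rw [List.getD_eq_getElem _ _ hj'lt]
      have := hgetE 0 j' (by omega) hj'lt (by omega)
      omega
  · -- split the range at j
    have hjj : ids.length - 1 = (j - 1) + (1 + (ids.length - 1 - j)) := by omega
    rw [hjj, ← List.range'_append_1, List.foldl_append]
    rw [show List.range' (1 + (j - 1)) (1 + (ids.length - 1 - j)) =
        j :: List.range' (j + 1) (ids.length - 1 - j) by
      rw [show (1 + (j - 1)) = j by omega,
          show 1 + (ids.length - 1 - j) = (ids.length - 1 - j) + 1 by omega,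
          List.range'_succ]]
    rw [List.foldl_cons]
    rw [pvFoldSet_preserve ids k hnn _ _ ?_]
    · have hgd : ids.getD j 0 = ids[j] := List.getD_eq_getElem _ _ hj
      have hklt : k < ((List.range' 1 (j-1)).foldl
          (fun l j => l.set (ids.getD j 0).toNat (ids.take j))
          (lab.set (ids.getD 0 0).toNat [ids.getD 0 0])).length := by
        rw [pvFoldSet_length, List.length_set]
        have := hb _ (hk ▸ List.getElem_mem hj); omega
      rw [hgd, hk, if_neg (by omega)]
      have hklt2 : k < lab.length := by have := hb _ (hk ▸ List.getElem_mem hj); omega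
      have hX : k < (List.foldl (fun l j => l.set (ids.getD j 0).toNat (List.take j ids))
          (lab.set (ids.getD 0 0).toNat [ids.getD 0 0]) (List.range' 1 (j - 1))).length := by
        rw [pvFoldSet_length, List.length_set]; exact hklt2
      exact List.getElem?_set_self hX
    · intro j' hj'
      have hj'r := List.mem_range'_1.1 hj'
      have hj'lt : j' < ids.length := by omega
      rw [List.getD_eq_getElem _ _ hj'lt]
      have := hgetE j j' hj hj'lt (by omega)
      omega

theorem pvPairsFrom_take (i : Int) (es : List Int) (k : Nat) :
    (pvPairsFrom i es).take k = pvPairsFrom i (es.take k) := by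
  induction es generalizing i k with
  | nil => simp [pvPairsFrom]
  | cons a es ih =>
    cases k with
    | zero => simp [pvPairsFrom]
    | succ k => simp [pvPairsFrom, ih]

theorem pvPairsFrom_getElem (i : Int) (es : List Int) (k : Nat) (hk : k < es.length) :
    (pvPairsFrom i es)[k]'(by rw [pvPairsFrom_length]; exact_mod_cast hk) = (i + k, es[k]) := by
  induction es generalizing i k with
  | nil => simp at hk
  | cons a es ih =>
    cases k with
    | zero => simp [pvPairsFrom]
    | succ k =>
      have := ih (i + 1) k (by simpa using hk)
      simp only [pvPairsFrom, List.getElem_cons_succ, this]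
      congr 1
      push_cast
      ring

theorem pvSpecAux_getElem (ps : List (Int × Int)) :
    ∀ (done : List (Int × Int)) (k : Nat) (hk : k < ps.length),
    (pvSpecAux done ps)[k]'(by rw [pvSpecAux_length]; exact hk) =
      (if pvGroupOf (done ++ ps.take k) (ps[k].2) = []
       then [(ps[k].1)] else pvGroupOf (done ++ ps.take k) (ps[k].2)) := by
  induction ps with
  | nil => intro done k hk; simp at hk
  | cons p ps ih =>
    intro done k hk
    obtain ⟨i, e⟩ := p
    cases k with
    | zero => simp [pvSpecAux]
    | succ k =>
      have := ih (done ++ [(i, e)]) k (by simpa using hk)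
      simp only [pvSpecAux, List.getElem_cons_succ, this, List.take_succ_cons,
        List.getElem_cons_succ, List.append_assoc, List.singleton_append]

theorem pvGroupOf_take (es : List Int) (e : Int) (k : Nat) :
    pvGroupOf (pvPairsFrom 0 (es.take k)) e =
      (pvGroupOf (pvPairsFrom 0 es) e).filter (fun x => decide (x < (k : Int))) := by
  conv_rhs => rw [← List.take_append_drop k es]
  rw [pvPairsFrom_append, pvGroupOf_append, List.filter_append]
  have h1 : (pvGroupOf (pvPairsFrom 0 (es.take k)) e).filter (fun x => decide (x < (k : Int))) =
      pvGroupOf (pvPairsFrom 0 (es.take k)) e := by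
    rw [List.filter_eq_self]
    intro x hx
    have := pvGroupOf_bounds 0 (es.take k) e x hx
    have hlen : (es.take k).length ≤ k := by simp
    simp only [decide_eq_true_eq]
    have : x < ((es.take k).length : Int) := by omega
    omega
  have h2 : (pvGroupOf (pvPairsFrom (0 + (es.take k).length) (es.drop k)) e).filter
      (fun x => decide (x < (k : Int))) = [] := by
    rw [List.filter_eq_nil_iff]
    intro x hx
    have := pvGroupOf_bounds (0 + (es.take k).length) (es.drop k) e x hx
    rcases Nat.lt_or_ge es.length k with hkk | hkk
    · have : es.drop k = [] := by simp; omega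
      rw [this] at hx
      simp [pvPairsFrom, pvGroupOf] at hx
    · have : (es.take k).length = k := by simp [hkk]
      simp only [decide_eq_true_eq] at *
      omega
  rw [h1, h2, List.append_nil]

theorem pvFilter_lt_take (g : List Int) (hinc : g.Pairwise (· < ·)) (j : Nat) (hj : j < g.length) :
    g.filter (fun x => decide (x < g[j])) = g.take j := by
  have hgetE := List.pairwise_iff_getElem.1 hinc
  obtain ⟨a, ha⟩ : ∃ a, g[j] = a := ⟨_, rfl⟩
  rw [ha]
  conv_lhs => rw [← List.take_append_drop j g]
  rw [List.filter_append]
  have h1 : (g.take j).filter (fun x => decide (x < a)) = g.take j := by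
    rw [List.filter_eq_self]
    intro x hx
    obtain ⟨i, hi, rfl⟩ := List.mem_iff_getElem.1 hx
    have hilt : i < j := by have := hi; simp at this; omega
    rw [List.getElem_take]
    simp only [decide_eq_true_eq]
    rw [← ha]
    exact hgetE i j (by omega) hj hilt
  have h2 : (g.drop j).filter (fun x => decide (x < a)) = [] := by
    rw [List.filter_eq_nil_iff]
    intro x hx
    obtain ⟨i, hi, rfl⟩ := List.mem_iff_getElem.1 hx
    rw [List.getElem_drop]
    simp only [decide_eq_true_eq, not_lt, ← ha]
    rcases Nat.eq_zero_or_pos i with rfl | hipos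
    · simp
    · have := hgetE j (j + i) hj (by simp at hi; omega) (by omega)
      omega
  rw [h1, h2, List.append_nil]

theorem pvFoldGroups_length (E : List Int) (ds : List Int) :
    ∀ l : List (List Int),
    ((ds.foldl (fun lab e => pvScatterGroup lab (pvGroupOf (pvPairsFrom 0 E) e)) l)).length
      = l.length := by
  induction ds with
  | nil => intro l; rfl
  | cons d ds ih =>
    intro l
    rw [List.foldl_cons, ih, pvScatterGroup_length]
    intro x hx
    exact (pvGroupOf_bounds 0 E d x hx).1

theorem pvFoldGroups_miss (E : List Int) (k : Nat) :
    ∀ (ds : List Int) (l : List (List Int)),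
    (∀ e ∈ ds, (k : Int) ∉ pvGroupOf (pvPairsFrom 0 E) e ∧ e ∈ E) →
    ((ds.foldl (fun lab e => pvScatterGroup lab (pvGroupOf (pvPairsFrom 0 E) e)) l))[k]? = l[k]? := by
  intro ds
  induction ds with
  | nil => intro l _; rfl
  | cons d ds ih =>
    intro l h
    rw [List.foldl_cons, ih _ (fun e he => h e (List.mem_cons_of_mem _ he))]
    obtain ⟨hk, hd⟩ := h d (List.mem_cons_self)
    rw [pvScatterGroup_miss]
    · intro x hx; exact (pvGroupOf_bounds 0 E d x hx).1
    · exact (pvGroupOf_ne_nil_iff 0 E d).2 hd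
    · exact hk

theorem pvScatter_spec (E : List Int) (em : PySem.Dict Int (List Int)) (h : pvInvB E em) :
    em.values.foldl pvScatterGroup (List.replicate E.length []) =
      pvSpecAux [] (pvPairsFrom 0 E) := by
  obtain ⟨h1, h2⟩ := h
  have hnd : em.keys.Nodup := h2 ▸ PySem.Set.nodup_ofList E
  have hvals : em.values =
      (PySem.Set.ofList E).map (fun e => pvGroupOf (pvPairsFrom 0 E) e) := by
    rw [PySem.Dict.values_eq_map_keys em hnd [], h2]
    exact List.map_congr_left (fun e _ => h1 e)
  rw [hvals, List.foldl_map]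
  apply List.ext_getElem?
  intro k
  have hlenL : ((PySem.Set.ofList E).foldl
      (fun lab e => pvScatterGroup lab (pvGroupOf (pvPairsFrom 0 E) e))
      (List.replicate E.length [])).length = E.length := by
    rw [pvFoldGroups_length]; simp
  have hlenR : (pvSpecAux [] (pvPairsFrom 0 E)).length = E.length := by
    rw [pvSpecAux_length, pvPairsFrom_length]
  rcases Nat.lt_or_ge k E.length with hk | hk
  · have hPk : (pvPairsFrom 0 E)[k]'(by rw [pvPairsFrom_length]; exact hk) =
        ((k : Int), E[k]) := by
      rw [pvPairsFrom_getElem 0 E k hk]; simp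
    have hRHS : (pvSpecAux [] (pvPairsFrom 0 E))[k]? =
        some (if (pvGroupOf (pvPairsFrom 0 E) E[k]).filter (fun x => decide (x < (k : Int))) = []
          then [(k : Int)]
          else (pvGroupOf (pvPairsFrom 0 E) E[k]).filter (fun x => decide (x < (k : Int)))) := by
      rw [List.getElem?_eq_getElem (by rw [hlenR]; exact hk)]
      rw [pvSpecAux_getElem _ [] k (by rw [pvPairsFrom_length]; exact hk)]
      rw [List.nil_append, pvPairsFrom_take, pvGroupOf_take, hPk]
    rw [hRHS]
    have hkmem : (k : Int) ∈ pvGroupOf (pvPairsFrom 0 E) E[k] := by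
      rw [pvMem_groupOf, pvMem_pairsFrom]
      exact ⟨k, hk, by simp, rfl⟩
    have hEk : E[k] ∈ PySem.Set.ofList E := by
      rw [PySem.Set.mem_ofList]; exact List.getElem_mem hk
    obtain ⟨l1, l2, hsplit⟩ := List.append_of_mem hEk
    have hnd2 : (l1 ++ E[k] :: l2).Nodup := by rw [← hsplit]; exact PySem.Set.nodup_ofList E
    rw [List.nodup_append] at hnd2
    obtain ⟨hnd1, hndc, hdisj⟩ := hnd2
    have hnotl2 : E[k] ∉ l2 := by simp at hndc; exact hndc.1
    have hnotl1 : E[k] ∉ l1 := by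
      intro hmem; exact hdisj _ hmem _ (List.mem_cons_self) rfl
    rw [hsplit, List.foldl_append, List.foldl_cons]
    rw [pvFoldGroups_miss E k l2 _ ?_]
    · obtain ⟨j, hj, hjk⟩ := List.mem_iff_getElem.1 hkmem
      have hlab1 : ((l1.foldl (fun lab e => pvScatterGroup lab (pvGroupOf (pvPairsFrom 0 E) e))
          (List.replicate E.length []))).length = E.length := by
        rw [pvFoldGroups_length]; simp
      rw [pvScatterGroup_hit _ _ ?_ ?_ ?_ j hj k hjk]
      · rw [show (pvGroupOf (pvPairsFrom 0 E) E[k]).filter (fun x => decide (x < (k : Int))) =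
            (pvGroupOf (pvPairsFrom 0 E) E[k]).take j by
          rw [← hjk]
          exact pvFilter_lt_take _ (pvGroupOf_pairwise 0 E E[k]) j hj]
        rcases Nat.eq_zero_or_pos j with rfl | hjpos
        · simp [List.getElem?_eq_getElem hj, hjk]
        · rw [if_neg (by omega), if_neg ?_]
          intro hcon
          have hlen := congrArg List.length hcon
          rw [List.length_take] at hlen
          simp only [List.length_nil, Nat.min_eq_zero_iff] at hlen
          omega
      · intro x hx; exact (pvGroupOf_bounds 0 E E[k] x hx).1
      · intro x hx
        have := (pvGroupOf_bounds 0 E E[k] x hx).2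
        rw [hlab1]
        omega
      · exact pvGroupOf_pairwise 0 E E[k]
    · intro e he
      constructor
      · intro hcon
        rw [pvMem_groupOf, pvMem_pairsFrom] at hcon
        obtain ⟨j, hjlt, hkj, hee⟩ := hcon
        have hjeq : j = k := by omega
        subst hjeq
        rw [show e = E[j] from hee] at he
        exact hnotl2 he
      · have hmem : e ∈ PySem.Set.ofList E := by
          rw [hsplit]; exact List.mem_append_right _ (List.mem_cons_of_mem _ he)
        rw [PySem.Set.mem_ofList] at hmem
        exact hmem
  · rw [List.getElem?_eq_none (by rw [hlenL]; exact hk),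
        List.getElem?_eq_none (by rw [hlenR]; exact hk)]

theorem pvInvA_empty : pvInvA [] PySem.Dict.empty := by
  constructor
  · intro e; simp [PySem.Dict.getD_empty, PySem.Dict.keys_empty, pvPairsFrom, pvGroupOf]
  · intro e; simp [PySem.Dict.contains_empty]

theorem pvInvB_empty : pvInvB [] PySem.Dict.empty := by
  constructor
  · intro e; simp [PySem.Dict.getD_empty, pvPairsFrom, pvGroupOf]
  · simp [PySem.Dict.keys_empty, PySem.Set.ofList]

theorem pvMain (all_doc_sents : List (List String)) (all_doc_ents : List (List (Int × Int × Int)))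
    (hpre : all_doc_sents.length ≤ all_doc_ents.length) :
    get_ant_labels all_doc_sents all_doc_ents = get_ant_labels_alt all_doc_sents all_doc_ents := by
  have hA := pvAOuter_spec all_doc_sents all_doc_ents 0 (by omega) 0 0 [] PySem.Dict.empty [] []
    pvInvA_empty
  obtain ⟨em', hB, hinvB⟩ := pvBOuter_spec (all_doc_sents.zip all_doc_ents) 0 0 []
    PySem.Dict.empty [] pvInvB_empty
  simp only [List.length_nil, Nat.cast_zero, List.drop_zero, List.nil_append,
    zero_add] at hA hB hinvB
  rw [get_ant_labels, hA]
  rw [get_ant_labels_alt, hB]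
  dsimp only
  have hn : ((pvFlatE (all_doc_sents.zip all_doc_ents)).length : Int).toNat =
      (pvFlatE (all_doc_sents.zip all_doc_ents)).length := by omega
  rw [hn, pvScatter_spec _ em' hinvB]
  rfl

-- ===== VERDICT (by name: the statement is the Claim_ definition above) =====
theorem get_ant_labels_spec : Claim_equal_get_ant_labels := by
  intro sents ents _ hpre
  unfold Spec_get_ant_labels
  exact pvMain sents ents hpre
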